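-- pv_equiv track=rewrite | github.com/MiguelMoutela/analytics | notebooks/src/aou_summary.py | get_cumulative_totals_by_site
-- ===== SOURCE A (Python) =====
-- def get_cumulative_totals_by_site(counts_by_site_per_interval, dates):
--     """Gets the running total by site
--     """
--     cumulative_totals_by_site = {}
--     for hpo in counts_by_site_per_interval:
--         cumulative_totals_by_site[hpo] = {}
--         for i, date in enumerate(dates):
--             count = counts_by_site_per_interval[hpo][date]
--             if i == 0:
--                 cumulative_totals_by_site[hpo][date] = count
--             else:
--                 prev_date = dates[i - 1]
--                 prev_count = cumulative_totals_by_site[hpo][prev_date]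
--                 cumulative_totals_by_site[hpo][date] = count + prev_count
--     return cumulative_totals_by_site
-- ===== SOURCE B (Python) =====
-- def get_cumulative_totals_by_site(counts_by_site_per_interval, dates):
--     """Gets the running total by site"""
--     return {
--         hpo: {
--             date: sum(counts[d] for d in dates[:i + 1])
--             for i, date in enumerate(dates)
--         }
--         for hpo, counts in counts_by_site_per_interval.items()
--     }
-- ===== Notes on version B (the rewrite author's own statement) =====
-- stated objective: alternative
-- what changed: Replaces A's stateful incremental loop, where each date's entry is computed by reading back the previously written output entry, with a direct definition: a nested dict comprehension mapping each date to the sum of the counts over the prefix of dates up to it (no running state).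
import Mathlib
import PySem

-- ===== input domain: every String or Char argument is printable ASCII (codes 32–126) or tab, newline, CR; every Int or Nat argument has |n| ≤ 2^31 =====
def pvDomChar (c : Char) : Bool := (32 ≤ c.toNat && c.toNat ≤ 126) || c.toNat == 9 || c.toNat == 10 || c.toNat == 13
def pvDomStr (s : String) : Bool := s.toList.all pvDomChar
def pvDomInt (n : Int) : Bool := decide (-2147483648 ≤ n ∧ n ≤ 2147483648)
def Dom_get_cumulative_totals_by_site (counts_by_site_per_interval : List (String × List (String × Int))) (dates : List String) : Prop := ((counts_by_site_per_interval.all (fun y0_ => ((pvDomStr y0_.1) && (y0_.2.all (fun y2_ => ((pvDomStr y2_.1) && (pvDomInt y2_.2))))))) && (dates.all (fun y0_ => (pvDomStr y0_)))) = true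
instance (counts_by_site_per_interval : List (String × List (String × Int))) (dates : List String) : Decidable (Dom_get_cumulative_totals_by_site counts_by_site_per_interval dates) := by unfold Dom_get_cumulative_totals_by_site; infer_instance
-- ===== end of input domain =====

-- B replaces A's stateful incremental loop (each entry computed from the previously written
-- output entry) with a direct definition: each date's total is the sum of the counts over the
-- prefix of dates up to it (dict/nested comprehension). Alternative algorithm, O(s·d²) vs O(s·d).

-- ===== PORT A =====
-- body of A's inner `for i, date in enumerate(dates)` loop, writing into site hpo's inner dict
def pvStepA (cd : PySem.Dict String (List (String × Int))) (hpo : String) (dates : List String)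
    (inner : PySem.Dict String Int) (p : Int × String) : PySem.Dict String Int :=
  let i := p.1
  let date := p.2
  -- counts_by_site_per_interval[hpo][date]; the date-KeyError case is excluded by Pre_
  let count := (PySem.Dict.mk (cd.getD hpo [])).getD date 0
  if i == 0 then inner.insert date count
  else
    let prev_date := PySem.List.pyGetD dates (i - 1) ""
    let prev_count := inner.getD prev_date 0
    inner.insert date (count + prev_count)

def get_cumulative_totals_by_site (counts_by_site_per_interval : List (String × List (String × Int))) (dates : List String) : List (String × List (String × Int)) :=
  let cd := PySem.Dict.ofList counts_by_site_per_interval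
  let result := cd.items.foldl
    (fun (acc : PySem.Dict String (PySem.Dict String Int)) p =>
      acc.insert p.1 ((PySem.List.enumerate dates 0).foldl (pvStepA cd p.1 dates) PySem.Dict.empty))
    PySem.Dict.empty
  result.items.map (fun q => (q.1, q.2.items))

-- ===== PORT B =====
-- sum(counts[d] for d in dates[:i+1]); the date-KeyError case is excluded by Pre_
def pvPrefixSum (counts : List (String × Int)) (dates : List String) (i : Int) : Int :=
  ((PySem.List.slice dates none (some (i + 1))).map
    (fun d => (PySem.Dict.mk counts).getD d 0)).sum

-- body of B's inner dict comprehension `{date: … for i, date in enumerate(dates)}`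
def pvStepB (counts : List (String × Int)) (dates : List String)
    (inner : PySem.Dict String Int) (p : Int × String) : PySem.Dict String Int :=
  inner.insert p.2 (pvPrefixSum counts dates p.1)

def get_cumulative_totals_by_site_alt (counts_by_site_per_interval : List (String × List (String × Int))) (dates : List String) : List (String × List (String × Int)) :=
  let cd := PySem.Dict.ofList counts_by_site_per_interval
  let result := cd.items.foldl
    (fun (acc : PySem.Dict String (PySem.Dict String Int)) p =>
      acc.insert p.1 ((PySem.List.enumerate dates 0).foldl (pvStepB p.2 dates) PySem.Dict.empty))
    PySem.Dict.empty
  result.items.map (fun q => (q.1, q.2.items))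

-- ===== PRECONDITION & SPEC =====
-- Pre_ excludes exactly the inputs where Python A raises KeyError: some date of `dates`
-- missing from some site's counts dict.
def Pre_get_cumulative_totals_by_site (counts_by_site_per_interval : List (String × List (String × Int))) (dates : List String) : Prop :=
  ∀ p ∈ counts_by_site_per_interval, ∀ d ∈ dates, (p.2.map Prod.fst).contains d = true
instance (counts_by_site_per_interval : List (String × List (String × Int))) (dates : List String) : Decidable (Pre_get_cumulative_totals_by_site counts_by_site_per_interval dates) := by unfold Pre_get_cumulative_totals_by_site; infer_instance

def pvWitness_get_cumulative_totals_by_site : (List (String × List (String × Int))) × List String :=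
  ([("chci", [("2019-01-01", 2), ("2019-01-08", 3)]), ("nyc", [("2019-01-01", 5), ("2019-01-08", -1)])],
   ["2019-01-01", "2019-01-08"])

def Spec_get_cumulative_totals_by_site (counts_by_site_per_interval : List (String × List (String × Int))) (dates : List String) (out : List (String × List (String × Int))) : Prop := out = get_cumulative_totals_by_site_alt counts_by_site_per_interval dates
instance (counts_by_site_per_interval : List (String × List (String × Int))) (dates : List String) (out : List (String × List (String × Int))) : Decidable (Spec_get_cumulative_totals_by_site counts_by_site_per_interval dates out) := by unfold Spec_get_cumulative_totals_by_site; infer_instance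

-- ===== CLAIM =====
def Claim_equal_get_cumulative_totals_by_site : Prop := ∀ (counts_by_site_per_interval : List (String × List (String × Int))) (dates : List String), Dom_get_cumulative_totals_by_site counts_by_site_per_interval dates → Pre_get_cumulative_totals_by_site counts_by_site_per_interval dates → Spec_get_cumulative_totals_by_site counts_by_site_per_interval dates (get_cumulative_totals_by_site counts_by_site_per_interval dates)

-- ===== LEMMAS AND PROOFS =====

-- B's slice-sum at a natural index is the sum over dates.take (n+1)
theorem pvPrefixSum_natCast (counts : List (String × Int)) (dates : List String) (n : Nat) :
    pvPrefixSum counts dates ((n : Int)) =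
      ((dates.take (n + 1)).map (fun d => (PySem.Dict.mk counts).getD d 0)).sum := by
  unfold pvPrefixSum
  have : (n : Int) + 1 = ((n + 1 : Nat) : Int) := by push_cast; ring
  rw [this, PySem.List.slice_to_natCast]

-- prefix-sum recurrence: one more date adds its count
theorem pvPrefixSum_succ (counts : List (String × Int)) (dates : List String) (k : Nat) (d : String)
    (hd : dates[k + 1]? = some d) :
    pvPrefixSum counts dates ((k : Int) + 1)
      = pvPrefixSum counts dates (k : Int) + (PySem.Dict.mk counts).getD d 0 := by
  have hcast : (k : Int) + 1 = ((k + 1 : Nat) : Int) := by push_cast; ring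
  rw [hcast, pvPrefixSum_natCast, pvPrefixSum_natCast]
  rw [List.take_add_one, hd]
  simp

-- From index k+1 onward, with A's dict holding the prefix sum through index k under dates[k],
-- A's fold equals B's fold.
theorem pvRun_eq (cd : PySem.Dict String (List (String × Int))) (hpo : String) (dates : List String) :
    ∀ (suf : List String) (k : Nat) (dA : PySem.Dict String Int),
    dates.drop (k + 1) = suf →
    dA.getD (dates[k]?.getD "") 0 = pvPrefixSum (cd.getD hpo []) dates (k : Int) →
    (PySem.List.enumerate suf ((k : Int) + 1)).foldl (pvStepA cd hpo dates) dA
      = (PySem.List.enumerate suf ((k : Int) + 1)).foldl (pvStepB (cd.getD hpo []) dates) dA := by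
  intro suf
  induction suf with
  | nil => intro k dA _ _; simp [PySem.List.enumerate_nil]
  | cons d suf' ih =>
    intro k dA hdrop hr
    have hk1 : (((k : Int) + 1) == 0) = false := by simp; omega
    have hprevidx : (k : Int) + 1 - 1 = (k : Int) := by ring
    have hd : dates[k + 1]? = some d := by
      have h0 : (dates.drop (k + 1))[0]? = some d := by rw [hdrop]; rfl
      rw [List.getElem?_drop] at h0
      simpa using h0
    have hdrop' : dates.drop (k + 1 + 1) = suf' := by
      rw [← List.tail_drop, hdrop]; rfl
    rw [PySem.List.enumerate_cons, List.foldl_cons, List.foldl_cons]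
    have hv : (PySem.Dict.mk (cd.getD hpo [])).getD d 0 + pvPrefixSum (cd.getD hpo []) dates (k : Int)
        = pvPrefixSum (cd.getD hpo []) dates ((k : Int) + 1) := by
      rw [pvPrefixSum_succ (cd.getD hpo []) dates k d hd]; ring
    have hstepA : pvStepA cd hpo dates dA ((k : Int) + 1, d)
        = dA.insert d (pvPrefixSum (cd.getD hpo []) dates ((k : Int) + 1)) := by
      simp [pvStepA, hk1, hprevidx, hr, hv]
    have hstepB : pvStepB (cd.getD hpo []) dates dA ((k : Int) + 1, d)
        = dA.insert d (pvPrefixSum (cd.getD hpo []) dates ((k : Int) + 1)) := by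
      simp [pvStepB]
    rw [hstepA, hstepB]
    have hcast : (k : Int) + 1 + 1 = ((k + 1 : Nat) : Int) + 1 := by push_cast; ring
    rw [hcast]
    exact ih (k + 1) _ hdrop'
      (by rw [hd]; simp [PySem.Dict.getD_insert_self])

-- A's whole inner loop equals B's whole inner comprehension fold
theorem pvInner_eq (cd : PySem.Dict String (List (String × Int))) (hpo : String) (dates : List String) :
    (PySem.List.enumerate dates 0).foldl (pvStepA cd hpo dates) PySem.Dict.empty
      = (PySem.List.enumerate dates 0).foldl (pvStepB (cd.getD hpo []) dates) PySem.Dict.empty := by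
  cases dates with
  | nil => simp [PySem.List.enumerate_nil]
  | cons d rest =>
    rw [PySem.List.enumerate_cons, List.foldl_cons, List.foldl_cons]
    have h0 : pvPrefixSum (cd.getD hpo []) (d :: rest) (0 : Int)
        = (PySem.Dict.mk (cd.getD hpo [])).getD d 0 := by
      have : (0 : Int) = ((0 : Nat) : Int) := by norm_num
      rw [this, pvPrefixSum_natCast]; simp
    have hstepA : pvStepA cd hpo (d :: rest) PySem.Dict.empty (0, d)
        = PySem.Dict.empty.insert d ((PySem.Dict.mk (cd.getD hpo [])).getD d 0) := by
      simp [pvStepA]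
    have hstepB : pvStepB (cd.getD hpo []) (d :: rest) PySem.Dict.empty (0, d)
        = PySem.Dict.empty.insert d ((PySem.Dict.mk (cd.getD hpo [])).getD d 0) := by
      simp [pvStepB, h0]
    rw [hstepA, hstepB]
    have : (0 : Int) + 1 = ((0 : Nat) : Int) + 1 := by norm_num
    rw [this]
    exact pvRun_eq cd hpo (d :: rest) rest 0 _ rfl
      (by simp [h0, PySem.Dict.getD_insert_self])

-- ===== VERDICT =====
theorem get_cumulative_totals_by_site_spec : Claim_equal_get_cumulative_totals_by_site := by
  intro counts dates _ _
  unfold Spec_get_cumulative_totals_by_site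
  unfold get_cumulative_totals_by_site get_cumulative_totals_by_site_alt
  refine congrArg (List.map _)
    (congrArg PySem.Dict.items (PySem.List.foldl_congr_mem _ _ _ _ ?_))
  intro acc p hp
  obtain ⟨k0, v0⟩ := p
  congr 1
  rw [pvInner_eq (PySem.Dict.ofList counts) k0 dates]
  congr 2
  exact PySem.Dict.getD_of_mem_items _ hp (PySem.Dict.nodup_keys_ofList counts) []
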